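-- pv_equiv track=rewrite | github.com/knuu/competitive-programming | atcoder/abc/abc009_d_2.py | linear_recursion_solver
-- ===== SOURCE A (Python) =====
-- def linear_recursion_solver(a, x, k, e0, e1):
--     def rec(k):
--         c = [e0] * n
--         if k < n:
--             c[k] = e1
--             return c[:]
--         b = rec(k // 2)
--         t = [e0] * (2 * n + 1)
--         for i in range(n):
--             for j in range(n):
--                 t[i + j + (k & 1)] ^= b[i] & b[j]
--         for i in reversed(range(n, 2*n)):
--             for j in range(n):
--                 t[i - n + j] ^= a[j] & t[i]
--         for i in range(n):
--             c[i] = t[i]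
--         return c[:]
--     n = len(a)
--     c = rec(k)
--     ret = 0
--     for ci, xi in zip(c, x):
--         ret ^= ci & xi
--     return ret
-- ===== SOURCE B (Python) =====
-- def _step(a, c, bit, e0, n):
--     # square c (as a GF(2)-style coefficient vector), shifted by `bit`,
--     # then reduce modulo the characteristic polynomial given by a
--     t = [e0] * (2 * n + 1)
--     for i in range(n):
--         ci = c[i]
--         for j in range(n):
--             t[i + j + bit] ^= ci & c[j]
--     for i in reversed(range(n, 2 * n)):
--         v = t[i]
--         for j in range(n):
--             t[i - n + j] ^= a[j] & v
--     return t[:n]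
--
--
-- def linear_recursion_solver(a, x, k, e0, e1):
--     n = len(a)
--     # peel the low bits of k until the remaining prefix m is below n
--     bits = []
--     m = k
--     while m >= n:
--         bits.append(m % 2)
--         m //= 2
--     c = [e0] * n
--     c[m] = e1
--     # replay the peeled bits from most- to least-significant
--     for bit in reversed(bits):
--         c = _step(a, c, bit, e0, n)
--     ret = 0
--     for i in range(min(n, len(x))):
--         ret ^= c[i] & x[i]
--     return ret
-- ===== Notes on version B (the rewrite author's own statement) =====
-- stated objective: alternative
-- what changed: A's recursive halving rec(k) is replaced by an iterative loop: B peels the low bits of k into a list while the prefix stays >= n, starts from the base vector for the final prefix, and replays the bits most-significant-first through a square-shift-reduce step helper (which also hoists loop-invariant reads and returns t[:n] instead of an element-copy loop).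
import Mathlib
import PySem

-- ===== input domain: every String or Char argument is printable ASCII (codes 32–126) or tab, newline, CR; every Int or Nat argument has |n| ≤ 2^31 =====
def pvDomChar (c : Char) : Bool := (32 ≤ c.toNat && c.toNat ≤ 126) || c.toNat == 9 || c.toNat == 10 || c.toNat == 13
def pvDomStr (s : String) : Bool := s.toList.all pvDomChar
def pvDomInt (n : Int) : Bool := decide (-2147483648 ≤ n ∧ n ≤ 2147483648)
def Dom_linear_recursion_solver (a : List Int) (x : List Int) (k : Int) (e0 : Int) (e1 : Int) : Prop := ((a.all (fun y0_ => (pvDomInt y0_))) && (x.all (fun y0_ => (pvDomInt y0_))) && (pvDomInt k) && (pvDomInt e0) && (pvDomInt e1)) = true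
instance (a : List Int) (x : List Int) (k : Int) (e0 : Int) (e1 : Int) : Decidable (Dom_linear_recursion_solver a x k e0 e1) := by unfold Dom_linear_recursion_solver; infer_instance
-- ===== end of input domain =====

-- B replaces A's recursive halving `rec` by an iterative loop over the peeled bits of k
-- (same step computation, run most-significant-bit first); objective: alternative decomposition.

-- t[idx] ^= v  (both Pythons perform this update; indices are in range in every executed loop)
def pvXorAt (t : List Int) (idx : Nat) (v : Int) : List Int :=
  t.set idx (PySem.Int.bxor (t.getD idx 0) v)

-- ===== PORT A =====
-- A's inner `rec(k)`: n = len(a); base case writes e1 at Python index k (negative k wraps),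
-- otherwise square rec(k//2) shifted by k&1 and reduce modulo a.  Python diverges for n = 0
-- (excluded by Pre_); the `n = 0 → []` guard only makes the Lean definition total.
def pvRecA (a : List Int) (e0 e1 : Int) (n : Nat) (k : Int) : List Int :=
  let c := List.replicate n e0
  if _hk : k < (n : Int) then
    PySem.List.pySetD c k e1
  else if _hn : n = 0 then []
  else
    let b := pvRecA a e0 e1 n (PySem.Int.floordiv k 2)
    let bit := (PySem.Int.band k 1).toNat
    let t := (List.range n).foldl (fun t i =>
        (List.range n).foldl (fun t j =>
          pvXorAt t (i + j + bit) (PySem.Int.band (b.getD i 0) (b.getD j 0))) t)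
      (List.replicate (2 * n + 1) e0)
    -- reversed(range(n, 2*n)) over Nat indices; i - n + j is the Python index (i ≥ n here)
    let t := ((List.range' n n).reverse).foldl (fun t i =>
        (List.range n).foldl (fun t j =>
          pvXorAt t (i - n + j) (PySem.Int.band (a.getD j 0) (t.getD i 0))) t) t
    (List.range n).foldl (fun c i => c.set i (t.getD i 0)) c
termination_by k.toNat
decreasing_by
  simp only [PySem.Int.floordiv_eq_ediv_of_pos (by omega : (0:Int) < 2)]
  omega

def linear_recursion_solver (a : List Int) (x : List Int) (k : Int) (e0 : Int) (e1 : Int) : Int :=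
  let n := a.length
  let c := pvRecA a e0 e1 n k
  (c.zip x).foldl (fun ret p => PySem.Int.bxor ret (PySem.Int.band p.1 p.2)) 0

-- ===== PORT B =====
-- Source B's `_step`: square c shifted by `bit` (hoisting c[i]), reduce (hoisting v = t[i]), return t[:n]
def pvStepB (a : List Int) (e0 : Int) (n : Nat) (c : List Int) (bit : Nat) : List Int :=
  let t := (List.range n).foldl (fun t i =>
      let ci := c.getD i 0
      (List.range n).foldl (fun t j => pvXorAt t (i + j + bit) (PySem.Int.band ci (c.getD j 0))) t)
    (List.replicate (2 * n + 1) e0)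
  let t := ((List.range' n n).reverse).foldl (fun t i =>
      let v := t.getD i 0
      (List.range n).foldl (fun t j => pvXorAt t (i - n + j) (PySem.Int.band (a.getD j 0) v)) t) t
  PySem.List.slice t none (some (n : Int))

-- Source B's while loop: peel m % 2 while m >= n, returning (bits in peel order, final m).
-- Python diverges for n = 0 (excluded by Pre_); the `0 < n` conjunct only makes it total.
def pvBitsB (n : Nat) (m : Int) : List Nat × Int :=
  if h : (n : Int) ≤ m ∧ 0 < n then
    let p := pvBitsB n (PySem.Int.floordiv m 2)
    ((PySem.Int.mod m 2).toNat :: p.1, p.2)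
  else ([], m)
termination_by m.toNat
decreasing_by
  simp only [PySem.Int.floordiv_eq_ediv_of_pos (by omega : (0:Int) < 2)]
  omega

def linear_recursion_solver_alt (a : List Int) (x : List Int) (k : Int) (e0 : Int) (e1 : Int) : Int :=
  let n := a.length
  let p := pvBitsB n k
  let c0 := PySem.List.pySetD (List.replicate n e0) p.2 e1
  let c := p.1.reverse.foldl (fun c bit => pvStepB a e0 n c bit) c0
  (List.range (min n x.length)).foldl
    (fun ret i => PySem.Int.bxor ret (PySem.Int.band (c.getD i 0) (x.getD i 0))) 0

-- ===== PRECONDITION & SPEC =====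
-- Pre_ excludes exactly the inputs where the Python A does not return: a = [] (infinite
-- recursion / IndexError) and k < -len(a) (IndexError in the base case c[k] = e1).
def Pre_linear_recursion_solver (a : List Int) (x : List Int) (k : Int) (e0 : Int) (e1 : Int) : Prop :=
  a ≠ [] ∧ -(a.length : Int) ≤ k
instance (a : List Int) (x : List Int) (k : Int) (e0 : Int) (e1 : Int) : Decidable (Pre_linear_recursion_solver a x k e0 e1) := by unfold Pre_linear_recursion_solver; infer_instance

def pvWitness_linear_recursion_solver : List Int × List Int × Int × Int × Int := ([1, 1], [1, 2], 5, 0, 1)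

def Spec_linear_recursion_solver (a : List Int) (x : List Int) (k : Int) (e0 : Int) (e1 : Int) (out : Int) : Prop := out = linear_recursion_solver_alt a x k e0 e1
instance (a : List Int) (x : List Int) (k : Int) (e0 : Int) (e1 : Int) (out : Int) : Decidable (Spec_linear_recursion_solver a x k e0 e1 out) := by unfold Spec_linear_recursion_solver; infer_instance

-- ===== CLAIM (what is proved, stated in full; the proofs are below) =====
def Claim_equal_linear_recursion_solver : Prop := ∀ (a : List Int) (x : List Int) (k : Int) (e0 : Int) (e1 : Int), Dom_linear_recursion_solver a x k e0 e1 → Pre_linear_recursion_solver a x k e0 e1 → Spec_linear_recursion_solver a x k e0 e1 (linear_recursion_solver a x k e0 e1)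

-- ===== LEMMAS AND PROOFS =====

-- the dot product: A's fold over zip c x equals B's fold over range(min(len c, len x))
theorem pv_dot_eq (c x : List Int) (r : Int) :
    (c.zip x).foldl (fun ret p => PySem.Int.bxor ret (PySem.Int.band p.1 p.2)) r =
    (List.range (min c.length x.length)).foldl
      (fun ret i => PySem.Int.bxor ret (PySem.Int.band (c.getD i 0) (x.getD i 0))) r := by
  induction c generalizing x r with
  | nil => simp
  | cons ch ct ih =>
    cases x with
    | nil => simp
    | cons xh xt =>
      simp only [List.zip_cons_cons, List.foldl_cons, List.length_cons]
      rw [ih xt]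
      have : min (ct.length + 1) (xt.length + 1) = min ct.length xt.length + 1 := by omega
      rw [this, List.range_succ_eq_map, List.foldl_cons, List.foldl_map]
      simp [List.getD]

theorem pv_getD_set_ne (t : List Int) (m i : Nat) (x : Int) (h : m ≠ i) :
    (t.set m x).getD i 0 = t.getD i 0 := by
  simp [List.getD, h]

theorem pv_xor_fold_hoist (g : Nat → Int) (idx : Nat → Nat) (i : Nat) (js : List Nat)
    (hne : ∀ j ∈ js, idx j ≠ i) (t : List Int) (v : Int) (hv : t.getD i 0 = v) :
    js.foldl (fun t j => pvXorAt t (idx j) (PySem.Int.band (g j) (t.getD i 0))) t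
    = js.foldl (fun t j => pvXorAt t (idx j) (PySem.Int.band (g j) v)) t := by
  induction js generalizing t with
  | nil => rfl
  | cons j js ih =>
    simp only [List.foldl_cons, hv]
    exact ih (fun j hj => hne j (by simp [hj])) _
      (by rw [pvXorAt, pv_getD_set_ne _ _ _ _ (hne j (by simp))]; exact hv)

theorem pv_foldl_length {α : Type} (f : List Int → α → List Int)
    (h : ∀ t x, (f t x).length = t.length) (l : List α) (t : List Int) :
    (l.foldl f t).length = t.length := by
  induction l generalizing t with
  | nil => rfl
  | cons y l ih => rw [List.foldl_cons, ih, h]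

-- ==== ports (copies from equiv.lean) ====
theorem pv_foldl_set_getElem? (is : List Nat) (f : Nat → Int) (c : List Int) (j : Nat)
    (hmem : ∀ i ∈ is, i < c.length) :
    (is.foldl (fun c i => c.set i (f i)) c)[j]? =
      if j ∈ is then some (f j) else getElem? c j := by
  induction is generalizing c with
  | nil => simp
  | cons i is ih =>
    simp only [List.foldl_cons]
    rw [ih _ (by intro i hi; simpa using hmem i (by simp [hi]))]
    by_cases hji : j ∈ is
    · simp [hji]
    · have hi : i < c.length := hmem i (by simp)
      by_cases hij : i = j
      · subst hij; simp [hji, hi]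
      · simp [hji, hij]
        intro h; exact absurd h.symm hij

theorem pv_copy_eq (t : List Int) (e0 : Int) (n : Nat) (h : n ≤ t.length) :
    (List.range n).foldl (fun c i => c.set i (t.getD i 0)) (List.replicate n e0) = t.take n := by
  apply List.ext_getElem?
  intro j
  rw [pv_foldl_set_getElem? _ _ _ _ (by intro i hi; simp at hi ⊢; omega)]
  by_cases hj : j < n
  · simp [hj, List.getD, List.getElem?_eq_getElem (by omega : j < t.length),
      List.getElem?_take_of_lt hj]
  · simp [hj, List.mem_range]

theorem pv_rec_step (a : List Int) (e0 e1 : Int) (n : Nat) (k : Int)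
    (hk : ¬ k < (n : Int)) (hn : 0 < n) :
    pvRecA a e0 e1 n k =
      pvStepB a e0 n (pvRecA a e0 e1 n (PySem.Int.floordiv k 2)) (PySem.Int.mod k 2).toNat := by
  rw [pvRecA]
  simp only [dif_neg hk, dif_neg (by omega : ¬ n = 0)]
  rw [pvStepB]
  set b := pvRecA a e0 e1 n (PySem.Int.floordiv k 2) with hb
  have hbit : PySem.Int.band k 1 = PySem.Int.mod k 2 := PySem.Int.band_one k
  rw [hbit]
  set t1 := (List.range n).foldl (fun t i =>
      (List.range n).foldl (fun t j =>
        pvXorAt t (i + j + (PySem.Int.mod k 2).toNat) (PySem.Int.band (b.getD i 0) (b.getD j 0))) t)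
    (List.replicate (2 * n + 1) e0) with ht1
  -- reduction loops: hoisting v = t[i] is sound since every write lands below i
  have hred : ((List.range' n n).reverse).foldl (fun t i =>
        (List.range n).foldl (fun t j =>
          pvXorAt t (i - n + j) (PySem.Int.band (a.getD j 0) (t.getD i 0))) t) t1
      = ((List.range' n n).reverse).foldl (fun t i =>
        let v := t.getD i 0
        (List.range n).foldl (fun t j =>
          pvXorAt t (i - n + j) (PySem.Int.band (a.getD j 0) v)) t) t1 := by
    apply PySem.List.foldl_congr_mem
    intro acc i hi
    have hin : n ≤ i := by
      rw [List.mem_reverse, List.mem_range'_1] at hi; omega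
    exact pv_xor_fold_hoist (fun j => a.getD j 0) (fun j => i - n + j) i (List.range n)
      (by intro j hj; simp at hj ⊢; omega) acc _ rfl
  rw [hred]
  set t2 := ((List.range' n n).reverse).foldl (fun t i =>
        let v := t.getD i 0
        (List.range n).foldl (fun t j =>
          pvXorAt t (i - n + j) (PySem.Int.band (a.getD j 0) v)) t) t1 with ht2
  have h2 : ∀ t : List Int, (((List.range' n n).reverse).foldl (fun t i =>
        let v := t.getD i 0;
        (List.range n).foldl (fun t j =>
          pvXorAt t (i - n + j) (PySem.Int.band (a.getD j 0) v)) t) t).length = t.length := by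
    intro t
    apply pv_foldl_length
    intro t i
    dsimp only
    apply pv_foldl_length
    intro t j
    simp [pvXorAt]
  have h1 : ∀ t : List Int, ((List.range n).foldl (fun t i =>
        (List.range n).foldl (fun t j =>
          pvXorAt t (i + j + (PySem.Int.mod k 2).toNat) (PySem.Int.band (b.getD i 0) (b.getD j 0))) t) t).length = t.length := by
    intro t
    apply pv_foldl_length
    intro t i
    apply pv_foldl_length
    intro t j
    simp [pvXorAt]
  have hlen2 : t2.length = 2 * n + 1 := by
    rw [ht2, h2, ht1, h1, List.length_replicate]
  rw [PySem.List.slice_to_natCast, pv_copy_eq _ _ _ (by omega)]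

theorem pv_rec_eq_fold (a : List Int) (e0 e1 : Int) (n : Nat) (hn : 0 < n) (k : Int) :
    pvRecA a e0 e1 n k =
      (pvBitsB n k).1.reverse.foldl (fun c bit => pvStepB a e0 n c bit)
        (PySem.List.pySetD (List.replicate n e0) (pvBitsB n k).2 e1) := by
  induction hm : k.toNat using Nat.strong_induction_on generalizing k with
  | _ m ih =>
  by_cases hk : k < (n : Int)
  · rw [pvRecA, pvBitsB]
    simp only [dif_pos hk, dif_neg (by omega : ¬ ((n:Int) ≤ k ∧ 0 < n))]
    simp
  · rw [pv_rec_step a e0 e1 n k hk hn]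
    rw [pvBitsB]
    simp only [dif_pos (⟨by omega, hn⟩ : (n:Int) ≤ k ∧ 0 < n)]
    simp only [List.reverse_cons, List.foldl_append, List.foldl_cons, List.foldl_nil]
    rw [ih (PySem.Int.floordiv k 2).toNat
      (by rw [PySem.Int.floordiv_eq_ediv_of_pos (by omega : (0:Int) < 2)]; omega)
      (PySem.Int.floordiv k 2) rfl]

theorem pv_length_recA (a : List Int) (e0 e1 : Int) (n : Nat) (k : Int) :
    (pvRecA a e0 e1 n k).length = n := by
  rw [pvRecA]
  by_cases hk : k < (n : Int)
  · simp [hk, PySem.List.length_pySetD]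
  · by_cases hn : n = 0
    · rw [dif_neg hk, dif_pos hn]; simp [hn]
    · simp only [dif_neg hk, dif_neg hn]
      rw [pv_foldl_length _ (fun c i => List.length_set ..)]
      simp

-- ===== VERDICT (by name: the statement is the Claim_ definition above) =====
theorem linear_recursion_solver_spec : Claim_equal_linear_recursion_solver := by
  intro a x k e0 e1 _hdom hpre
  unfold Spec_linear_recursion_solver linear_recursion_solver linear_recursion_solver_alt
  have hn : 0 < a.length := by
    cases a with
    | nil => exact absurd rfl hpre.1
    | cons _ _ => simp
  dsimp only
  rw [pv_dot_eq, pv_length_recA, ← pv_rec_eq_fold a e0 e1 a.length hn k]
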